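-- pv_equiv track=rewrite | github.com/CapMushi/Dynamic-Agentic-Bot | backend/nodes/router_node.py | _determine_routing_path
-- ===== SOURCE A (Python) =====
-- from typing import Dict, Any, List
--
-- def _determine_routing_path(query_type: str, required_nodes: List[str]) -> List[str]:
--     """Determine the optimal routing path for the query"""
--
--     # Base path always includes persona selector
--     base_path = ["persona_selector"]
--
--     # Add processing nodes based on query type
--     if query_type == "mathematical":
--         base_path.extend(["database", "math"])
--     elif query_type == "factual":
--         base_path.append("document")
--     elif query_type == "conversational":
--         # For conversational queries, we might need both document and database
--         base_path.extend(["document", "database"])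
--
--     # Add answer formatter to generate the response first
--     base_path.append("answer_formatter")
--
--     # Then add suggestion generation based on the response
--     base_path.append("suggestion")
--
--     # Remove duplicates while preserving order
--     seen = set()
--     routing_path = []
--     for node in base_path:
--         if node not in seen:
--             routing_path.append(node)
--             seen.add(node)
--
--     return routing_path
-- ===== SOURCE B (Python) =====
-- # One universal node order; each node lists the query types that need it
-- # (None = always included). The path is a single filter over this table.
-- _NODE_TABLE = [
--     ("persona_selector", None),
--     ("document", ("factual", "conversational")),
--     ("database", ("mathematical", "conversational")),
--     ("math", ("mathematical",)),
--     ("answer_formatter", None),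
--     ("suggestion", None),
-- ]
--
-- def _determine_routing_path(query_type, required_nodes):
--     return [node for node, types in _NODE_TABLE
--             if types is None or query_type in types]
-- ===== Notes on version B (the rewrite author's own statement) =====
-- stated objective: alternative
-- what changed: Replaced the branch-extend-append construction plus a seen-set dedup pass with a single filter over one universal ordered node table in which every node carries the query types that need it; this works because all query-type-specific paths are subsequences of one global node order and never contain duplicates.
import Mathlib
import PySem

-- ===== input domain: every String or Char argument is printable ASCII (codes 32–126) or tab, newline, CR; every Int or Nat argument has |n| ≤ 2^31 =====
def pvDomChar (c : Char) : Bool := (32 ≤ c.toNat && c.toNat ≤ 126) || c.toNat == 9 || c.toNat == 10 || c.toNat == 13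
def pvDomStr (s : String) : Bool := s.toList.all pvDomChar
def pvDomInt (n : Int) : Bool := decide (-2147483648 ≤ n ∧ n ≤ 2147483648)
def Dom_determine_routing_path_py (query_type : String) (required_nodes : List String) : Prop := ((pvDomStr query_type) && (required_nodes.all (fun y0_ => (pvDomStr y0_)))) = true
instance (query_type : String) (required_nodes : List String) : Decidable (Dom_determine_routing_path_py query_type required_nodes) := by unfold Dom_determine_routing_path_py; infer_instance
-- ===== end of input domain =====

-- B builds the path as one filter over a universal ordered node table (each
-- node tagged with the query types needing it), replacing A's branch/extend
-- construction and dedup pass; equal return value, same cost (objective: alternative).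

-- ===== PORT A =====
def determine_routing_path_py (query_type : String) (required_nodes : List String) : List String :=
  let base_path : List String := ["persona_selector"]
  let base_path :=
    if query_type == "mathematical" then base_path ++ ["database", "math"]
    else if query_type == "factual" then base_path ++ ["document"]
    else if query_type == "conversational" then base_path ++ ["document", "database"]
    else base_path
  let base_path := base_path ++ ["answer_formatter"]
  let base_path := base_path ++ ["suggestion"]
  -- dedup loop: for node in base_path: if node not in seen: append; seen.add
  (base_path.foldl (fun (st : PySem.Set String × List String) node =>
      if PySem.Set.contains st.1 node then st
      else (st.1.add node, st.2 ++ [node])) ((PySem.Set.ofList [] : PySem.Set String), [])).2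

-- ===== PORT B =====
-- the universal node order; none = always included, some ts = included iff query_type ∈ ts
def pvNodeTable : List (String × Option (List String)) :=
  [("persona_selector", none),
   ("document", some ["factual", "conversational"]),
   ("database", some ["mathematical", "conversational"]),
   ("math", some ["mathematical"]),
   ("answer_formatter", none),
   ("suggestion", none)]

def determine_routing_path_py_alt (query_type : String) (required_nodes : List String) : List String :=
  (pvNodeTable.filter (fun p => match p.2 with
      | none => true
      | some ts => ts.contains query_type)).map (fun p => p.1)

-- ===== PRECONDITION & SPEC =====
def Spec_determine_routing_path_py (query_type : String) (required_nodes : List String) (out : List String) : Prop := out = determine_routing_path_py_alt query_type required_nodes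
instance (query_type : String) (required_nodes : List String) (out : List String) : Decidable (Spec_determine_routing_path_py query_type required_nodes out) := by unfold Spec_determine_routing_path_py; infer_instance

-- ===== CLAIM =====
def Claim_equal_determine_routing_path_py : Prop := ∀ (query_type : String) (required_nodes : List String), Dom_determine_routing_path_py query_type required_nodes → Spec_determine_routing_path_py query_type required_nodes (determine_routing_path_py query_type required_nodes)

-- ===== LEMMAS AND PROOFS =====

-- ===== VERDICT =====
theorem determine_routing_path_py_spec : Claim_equal_determine_routing_path_py := by
  intro query_type required_nodes _
  unfold Spec_determine_routing_path_py determine_routing_path_py determine_routing_path_py_alt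
  by_cases h1 : query_type = "mathematical"
  · subst h1; decide
  · by_cases h2 : query_type = "factual"
    · subst h2; decide
    · by_cases h3 : query_type = "conversational"
      · subst h3; decide
      · have b1 : ("mathematical" == query_type) = false := beq_eq_false_iff_ne.mpr (Ne.symm h1)
        have b2 : ("factual" == query_type) = false := beq_eq_false_iff_ne.mpr (Ne.symm h2)
        have b3 : ("conversational" == query_type) = false := beq_eq_false_iff_ne.mpr (Ne.symm h3)
        have c1 : (query_type == "mathematical") = false := beq_eq_false_iff_ne.mpr h1
        have c2 : (query_type == "factual") = false := beq_eq_false_iff_ne.mpr h2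
        have c3 : (query_type == "conversational") = false := beq_eq_false_iff_ne.mpr h3
        have m1 : (["factual", "conversational"].contains query_type) = false := by
          simp [List.contains_eq_mem, h2, h3]
        have m2 : (["mathematical", "conversational"].contains query_type) = false := by
          simp [List.contains_eq_mem, h1, h3]
        have m3 : (["mathematical"].contains query_type) = false := by
          simp [List.contains_eq_mem, h1]
        simp only [c1, c2, c3, Bool.false_eq_true, if_false]
        simp only [pvNodeTable, List.filter, m1, m2, m3]
        decide
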